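-- pv_equiv track=rewrite | github.com/karan-mittal06/KnoxDNS | AI-Classifier/url_process.py | extract_lexical_features
-- ===== SOURCE A (Python) =====
-- def extract_lexical_features(url):
--     """Extract lexical features from a single URL."""
--     return [
--         len(url),
--         sum(c.isdigit() for c in url),
--         url.count('-'),
--         url.count('_'),
--         url.count('.'),
--         url.count('/'),
--         url.count('?'),
--         url.count('='),
--         url.count('@'),
--         len(set(url))
--     ]
-- ===== SOURCE B (Python) =====
-- def extract_lexical_features(url):
--     """Extract lexical features from a single URL (single pass)."""
--     n = digits = hyph = und = dot = slash = qm = eq = at = 0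
--     seen = set()
--     for c in url:
--         n += 1
--         if c.isdigit():
--             digits += 1
--         if c == '-':
--             hyph += 1
--         if c == '_':
--             und += 1
--         if c == '.':
--             dot += 1
--         if c == '/':
--             slash += 1
--         if c == '?':
--             qm += 1
--         if c == '=':
--             eq += 1
--         if c == '@':
--             at += 1
--         seen.add(c)
--     return [n, digits, hyph, und, dot, slash, qm, eq, at, len(seen)]
-- ===== Notes on version B (the rewrite author's own statement) =====
-- stated objective: alternative
-- what changed: Replaced A's ten separate scans of the string (len, a generator sum, eight .count calls, len(set(url))) by one single-pass loop maintaining independent accumulators and a seen-set.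
import Mathlib
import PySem

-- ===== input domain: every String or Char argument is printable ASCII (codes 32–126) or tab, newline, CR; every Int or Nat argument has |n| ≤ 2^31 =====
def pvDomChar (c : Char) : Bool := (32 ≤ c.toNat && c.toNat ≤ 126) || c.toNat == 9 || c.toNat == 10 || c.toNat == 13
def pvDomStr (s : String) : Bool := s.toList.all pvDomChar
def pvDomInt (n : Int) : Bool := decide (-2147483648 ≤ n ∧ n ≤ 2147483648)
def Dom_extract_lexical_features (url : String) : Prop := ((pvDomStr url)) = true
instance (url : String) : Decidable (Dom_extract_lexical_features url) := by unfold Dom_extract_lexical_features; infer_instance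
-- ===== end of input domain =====

-- B replaces A's ten separate scans of the url by one single-pass loop over the
-- characters maintaining independent accumulators (objective: alternative, one pass).

-- ===== PORT A =====
-- A: ten independent scans (len, a generator sum, eight .count calls, len(set(url))).
def extract_lexical_features (url : String) : List Int :=
  [ (PySem.Str.len url : Int),
    ((url.toList.map (fun c => if PySem.Chars.isdigit c then (1 : Int) else 0)).sum),
    (PySem.Str.count url "-" : Int),
    (PySem.Str.count url "_" : Int),
    (PySem.Str.count url "." : Int),
    (PySem.Str.count url "/" : Int),
    (PySem.Str.count url "?" : Int),
    (PySem.Str.count url "=" : Int),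
    (PySem.Str.count url "@" : Int),
    (PySem.Set.len (PySem.Set.ofList url.toList) : Int) ]

-- ===== PORT B =====
-- B's loop state: nine integer accumulators and the set of characters seen so far.
structure LexAcc where
  n : Int
  digits : Int
  hyph : Int
  und : Int
  dot : Int
  slash : Int
  qm : Int
  eqs : Int
  ats : Int
  seen : PySem.Set Char
deriving Repr

-- one iteration of B's for-loop
def lexStep (s : LexAcc) (c : Char) : LexAcc :=
  { n := s.n + 1
    digits := if PySem.Chars.isdigit c then s.digits + 1 else s.digits
    hyph := if c = '-' then s.hyph + 1 else s.hyph
    und := if c = '_' then s.und + 1 else s.und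
    dot := if c = '.' then s.dot + 1 else s.dot
    slash := if c = '/' then s.slash + 1 else s.slash
    qm := if c = '?' then s.qm + 1 else s.qm
    eqs := if c = '=' then s.eqs + 1 else s.eqs
    ats := if c = '@' then s.ats + 1 else s.ats
    seen := PySem.Set.add s.seen c }

def extract_lexical_features_alt (url : String) : List Int :=
  let s := url.toList.foldl lexStep ⟨0, 0, 0, 0, 0, 0, 0, 0, 0, PySem.Set.empty⟩
  [s.n, s.digits, s.hyph, s.und, s.dot, s.slash, s.qm, s.eqs, s.ats,
   (PySem.Set.len s.seen : Int)]

-- ===== PRECONDITION & SPEC =====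
def Spec_extract_lexical_features (url : String) (out : List Int) : Prop := out = extract_lexical_features_alt url
instance (url : String) (out : List Int) : Decidable (Spec_extract_lexical_features url out) := by unfold Spec_extract_lexical_features; infer_instance

-- ===== CLAIM (what is proved, stated in full; the proofs are below) =====
def Claim_equal_extract_lexical_features : Prop := ∀ (url : String), Dom_extract_lexical_features url → Spec_extract_lexical_features url (extract_lexical_features url)

-- ===== LEMMAS AND PROOFS =====

-- Python str.count with a single-character needle counts occurrences of that character.
lemma count_go_single (v : Char) : ∀ (cs : List Char) (fuel acc : Nat), cs.length ≤ fuel →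
    PySem.Chars.count.go [v] fuel cs acc = acc + cs.count v := by
  intro cs
  induction cs with
  | nil => intro fuel acc _; cases fuel <;> simp [PySem.Chars.count.go]
  | cons h t ih =>
    intro fuel acc hle
    cases fuel with
    | zero => simp at hle
    | succ f =>
      simp only [PySem.Chars.count.go]
      by_cases hv : h = v
      · subst hv
        simp only [List.isPrefixOf, BEq.rfl, Bool.true_and, if_true,
          List.length_cons, List.drop_succ_cons, List.drop_zero, List.length_nil]
        rw [ih f (acc+1) (by simpa using hle)]
        simp
        omega
      · simp [List.isPrefixOf, hv, ih f acc (by simpa using hle), Ne.symm hv]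

lemma count_single (v : Char) (cs : List Char) : PySem.Chars.count cs [v] = cs.count v := by
  simp [PySem.Chars.count, count_go_single v cs cs.length 0 le_rfl]

-- B's loop computes, from any start state, exactly the per-character counts of the suffix.
lemma lex_foldl (cs : List Char) : ∀ (a : LexAcc),
    cs.foldl lexStep a =
      ⟨a.n + cs.length,
       a.digits + cs.countP (fun c => PySem.Chars.isdigit c),
       a.hyph + cs.count '-', a.und + cs.count '_', a.dot + cs.count '.',
       a.slash + cs.count '/', a.qm + cs.count '?', a.eqs + cs.count '=',
       a.ats + cs.count '@', PySem.Set.update a.seen cs⟩ := by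
  induction cs with
  | nil => intro a; simp [PySem.Set.update]
  | cons h t ih =>
    intro a
    simp only [List.foldl_cons, ih, lexStep, List.length_cons, List.countP_cons,
      List.count_cons, PySem.Set.update, List.foldl_cons, LexAcc.mk.injEq]
    clear ih
    and_intros
    all_goals try trivial
    all_goals try (push_cast; ring)
    all_goals split_ifs <;> (try simp_all) <;> ring

-- ===== VERDICT (by name: the statement is the Claim_ definition above) =====
theorem extract_lexical_features_spec : Claim_equal_extract_lexical_features := by
  intro url _
  unfold Spec_extract_lexical_features extract_lexical_features extract_lexical_features_alt
  rw [lex_foldl]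
  simp [PySem.Str.count, count_single, PySem.List.sum_map_ite_one_zero,
    PySem.Set.ofList, PySem.Set.update]
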